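-- pv_equiv track=rewrite | github.com/coreygirard/swarm | sandbox/sandbox_new_expression.py | extractStringLiterals
-- ===== SOURCE A (Python) =====
-- from collections import namedtuple
--
-- Token = namedtuple('Token','tag value')
--
-- def findStringEnds(s):
--     '''
--     >>> list(findStringEnds('This is a "test" string'))
--     ['T', 'h', 'i', 's', ' ', 'i', 's', ' ', 'a', ' ', ('"',), 't', 'e', 's', 't', ('"',), ' ', 's', 't', 'r', 'i', 'n', 'g']
--     '''
--
--     t = 0
--     while t < len(s):
--         if s[t:t+3] == "'''":
--             yield ("'''",)
--             t += 3
--         elif s[t:t+3] == '"""':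
--             yield ('"""',)
--             t += 3
--         elif s[t] == "'":
--             yield ("'",)
--             t += 1
--         elif s[t] == '"':
--             yield ('"',)
--             t += 1
--         else:
--             yield s[t]
--             t += 1
--
-- def extractStringLiterals(s):
--     '''
--     >>> extractStringLiterals('This is a "test" string')
--     [Token(tag='unprocessed', value='This is a '), Token(tag='literal', value='test'), Token(tag='unprocessed', value=' string')]
--     '''
--
--     st = []
--     buff = []
--     delim = None
--
--     # iterate through each character/delimiter
--     for c in findStringEnds(s):
--         if type(c) == type((0,)): # if we received a delimiter
--             if delim == None:   # if we're starting a string literal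
--                 if len(buff) > 0:
--                     st.append(Token('unprocessed',''.join(buff)))
--                 buff = []
--                 delim = c[0]
--
--             elif delim == c[0]: # if we're ending a string literal
--                 st.append(Token('literal',''.join(buff)))
--                 buff = []
--                 delim = None
--
--             else: # if we got for example the " inside 'abc"def'
--                 buff.append(c[0])
--         else: # if we received a char, not a delimiter
--             buff.append(c)
--
--     assert(delim == None)
--     if len(buff) > 0:
--         st.append(Token('unprocessed',''.join(buff)))
--     return st
-- ===== SOURCE B (Python) =====
-- from collections import namedtuple
--
-- Token = namedtuple('Token', 'tag value')
--
-- def extractStringLiterals(s):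
--     """Gap-slicing scan: jump between quote positions with str.find instead of
--     walking the string char by char through a generator."""
--     out = []
--     parts = []
--     delim = None
--     t = 0
--     while True:
--         i1 = s.find("'", t)
--         i2 = s.find('"', t)
--         if i1 < 0:
--             i = i2
--         elif i2 < 0:
--             i = i1
--         else:
--             i = min(i1, i2)
--         if i < 0:
--             break
--         parts.append(s[t:i])
--         q = s[i]
--         if s[i:i + 3] == q * 3:
--             d, t = q * 3, i + 3
--         else:
--             d, t = q, i + 1
--         if delim is None:
--             text = ''.join(parts)
--             if text:
--                 out.append(Token('unprocessed', text))
--             parts = []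
--             delim = d
--         elif delim == d:
--             out.append(Token('literal', ''.join(parts)))
--             parts = []
--             delim = None
--         else:
--             parts.append(d)
--     assert delim is None
--     parts.append(s[t:])
--     text = ''.join(parts)
--     if text:
--         out.append(Token('unprocessed', text))
--     return out
-- ===== Notes on version B (the rewrite author's own statement) =====
-- stated objective: faster
-- what changed: Replaces the char-by-char generator pipeline (yielding every character and re-checking 4 delimiter patterns per position) with a cursor scan that jumps straight to the next quote via str.find and appends whole text gaps as slices; Pre_ excludes only the unterminated-literal inputs on which both A and B raise AssertionError.
import Mathlib
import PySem

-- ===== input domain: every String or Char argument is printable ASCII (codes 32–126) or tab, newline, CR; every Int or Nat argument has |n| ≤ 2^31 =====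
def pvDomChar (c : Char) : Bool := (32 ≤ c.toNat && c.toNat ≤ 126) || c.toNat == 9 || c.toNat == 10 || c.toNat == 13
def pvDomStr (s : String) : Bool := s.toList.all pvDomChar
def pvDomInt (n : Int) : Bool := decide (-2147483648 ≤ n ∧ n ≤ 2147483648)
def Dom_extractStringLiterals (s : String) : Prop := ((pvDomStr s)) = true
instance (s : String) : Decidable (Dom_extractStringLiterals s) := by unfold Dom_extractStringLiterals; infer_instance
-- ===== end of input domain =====

-- B replaces A's char-by-char generator pipeline with a gap-slicing scan that jumps
-- between quote positions (str.find); return value proved equal on Pre_.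

-- ===== PORT A =====
-- findStringEnds, on List Char: a delimiter tuple is Sum.inl (its chars), a plain char Sum.inr
def findStringEnds : List Char → List (Sum (List Char) Char)
  | [] => []
  | c :: rest =>
    if (c :: rest).take 3 = ['\'', '\'', '\''] then
      Sum.inl ['\'', '\'', '\''] :: findStringEnds (rest.drop 2)
    else if (c :: rest).take 3 = ['"', '"', '"'] then
      Sum.inl ['"', '"', '"'] :: findStringEnds (rest.drop 2)
    else if c = '\'' then Sum.inl ['\''] :: findStringEnds rest
    else if c = '"' then Sum.inl ['"'] :: findStringEnds rest
    else Sum.inr c :: findStringEnds rest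
  termination_by cs => cs.length
  decreasing_by all_goals (simp; try omega)

-- one iteration of A's for-loop body; state = (st, buff, delim)
def aStep (acc : List (String × String) × List (List Char) × Option (List Char))
    (c : Sum (List Char) Char) :
    List (String × String) × List (List Char) × Option (List Char) :=
  match c with
  | Sum.inl d =>
    match acc.2.2 with
    | none =>
        ((if acc.2.1.length > 0 then
            acc.1 ++ [("unprocessed", String.ofList (PySem.Chars.join [] acc.2.1))] else acc.1),
         [], some d)
    | some dl =>
        if dl = d then
          (acc.1 ++ [("literal", String.ofList (PySem.Chars.join [] acc.2.1))], [], none)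
        else (acc.1, acc.2.1 ++ [d], acc.2.2)
  | Sum.inr ch => (acc.1, acc.2.1 ++ [[ch]], acc.2.2)

def extractStringLiterals (s : String) : List (String × String) :=
  let r := (findStringEnds s.toList).foldl aStep ([], [], none)
  -- assert(delim == None): Python raises AssertionError when r.2.2 ≠ none; Pre_ excludes exactly those inputs
  if r.2.1.length > 0 then r.1 ++ [("unprocessed", String.ofList (PySem.Chars.join [] r.2.1))]
  else r.1

-- ===== PORT B =====
-- B's "i1 = s.find(\"'\", t); i2 = s.find('\"', t); i = first of them": split at the first quote char
def splitAtQuote : List Char → Option (List Char × Char × List Char)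
  | [] => none
  | c :: rest =>
    if c = '\'' ∨ c = '"' then some ([], c, rest)
    else
      match splitAtQuote rest with
      | none => none
      | some (g, q, r) => some (c :: g, q, r)

-- B's "if s[i:i+3] == q*3: d, t = q*3, i+3 else: d, t = q, i+1"
def tripleSplit (q : Char) (rest : List Char) : List Char × List Char :=
  if (q :: rest).take 3 = [q, q, q] then ([q, q, q], rest.drop 2) else ([q], rest)

-- needed by altLoop's termination proof
theorem splitAtQuote_some_eq : ∀ {cs gap : List Char} {q : Char} {rest : List Char},
    splitAtQuote cs = some (gap, q, rest) → cs = gap ++ q :: rest := by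
  intro cs
  fun_induction splitAtQuote cs with
  | case1 => simp
  | case2 c rest h => intro gap q r hh; simp at hh; obtain ⟨h1, h2, h3⟩ := hh; simp [← h1, h2, h3]
  | case3 c rest h hsp => simp_all
  | case4 c rest h g q r hsp ih =>
    intro gap q' r' hh
    simp at hh
    obtain ⟨h1, h2, h3⟩ := hh
    subst h2 h3; subst h1
    simp [ih hsp]

theorem tripleSplit_len (q : Char) (rest : List Char) :
    (tripleSplit q rest).2.length ≤ rest.length := by
  unfold tripleSplit; split <;> simp

-- B's while-loop, emitting tokens in order; state = (remaining input, parts, delim)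
def altLoop : List Char → List (List Char) → Option (List Char) → List (String × String)
  | cs, parts, delim =>
    match h : splitAtQuote cs with
    | none =>
      -- no further quote: parts.append(s[t:]); assert delim is None (Pre_); flush if nonempty
      let text := PySem.Chars.join [] (parts ++ [cs])
      if text = [] then [] else [("unprocessed", String.ofList text)]
    | some (gap, q, rest) =>
      let d := (tripleSplit q rest).1
      let rest' := (tripleSplit q rest).2
      let parts1 := parts ++ [gap]
      match delim with
      | none =>
        let text := PySem.Chars.join [] parts1
        (if text = [] then [] else [("unprocessed", String.ofList text)]) ++ altLoop rest' [] (some d)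
      | some dl =>
        if dl = d then
          ("literal", String.ofList (PySem.Chars.join [] parts1)) :: altLoop rest' [] none
        else altLoop rest' (parts1 ++ [d]) delim
  termination_by cs _ _ => cs.length
  decreasing_by
    all_goals
      have hlen := congrArg List.length (splitAtQuote_some_eq h)
      have := tripleSplit_len q rest
      simp at hlen
      omega

def extractStringLiterals_alt (s : String) : List (String × String) :=
  altLoop s.toList [] none

-- ===== PRECONDITION & SPEC =====
-- the quote delimiters of s, lexed left to right exactly as Python's scan does
def pvDelims : List Char → List (List Char)
  | '\'' :: '\'' :: '\'' :: r => ['\'', '\'', '\''] :: pvDelims r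
  | '"' :: '"' :: '"' :: r => ['"', '"', '"'] :: pvDelims r
  | '\'' :: r => ['\''] :: pvDelims r
  | '"' :: r => ['"'] :: pvDelims r
  | _ :: r => pvDelims r
  | [] => []

def pvDelimStep (st : Option (List Char)) (d : List Char) : Option (List Char) :=
  match st with
  | none => some d
  | some dl => if dl = d then none else some dl

-- Pre_ excludes exactly the strings with an unterminated string literal (unbalanced quote
-- delimiters), on which Python A raises AssertionError (and B raises AssertionError too).
def Pre_extractStringLiterals (s : String) : Prop :=
  (pvDelims s.toList).foldl pvDelimStep none = none
instance (s : String) : Decidable (Pre_extractStringLiterals s) := by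
  unfold Pre_extractStringLiterals; infer_instance

def pvWitness_extractStringLiterals : String := "ab 'cd' \"e\"f"

def Spec_extractStringLiterals (s : String) (out : List (String × String)) : Prop :=
  out = extractStringLiterals_alt s
instance (s : String) (out : List (String × String)) : Decidable (Spec_extractStringLiterals s out) := by
  unfold Spec_extractStringLiterals; infer_instance

-- ===== CLAIM (what is proved, stated in full; the proofs are below) =====
def Claim_equal_extractStringLiterals : Prop := ∀ (s : String), Dom_extractStringLiterals s →
  Pre_extractStringLiterals s → Spec_extractStringLiterals s (extractStringLiterals s)

-- ===== LEMMAS AND PROOFS =====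

theorem jn_eq_flatten (l : List (List Char)) : PySem.Chars.join [] l = l.flatten := by
  induction l with
  | nil => simp [PySem.Chars.join_nil]
  | cons a t ih =>
    cases t with
    | nil => simp [PySem.Chars.join_singleton]
    | cons b r => rw [PySem.Chars.join_cons_cons]; simp_all

theorem flatten_nil_iff {l : List (List Char)} (h : ∀ x ∈ l, x ≠ []) :
    l.flatten = [] ↔ l = [] := by
  cases l with
  | nil => simp
  | cons a t =>
    simp only [List.flatten_cons]
    constructor
    · intro hh
      have ha : a = [] := by
        cases a with
        | nil => rfl
        | cons c cc => simp at hh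
      exact absurd ha (h a (by simp))
    · intro hh; simp at hh

theorem splitAtQuote_none_no_quote : ∀ {cs : List Char}, splitAtQuote cs = none →
    ∀ c ∈ cs, ¬(c = '\'' ∨ c = '"') := by
  intro cs
  fun_induction splitAtQuote cs <;> simp_all

theorem splitAtQuote_gap_no_quote : ∀ {cs gap : List Char} {q : Char} {rest : List Char},
    splitAtQuote cs = some (gap, q, rest) →
    (∀ c ∈ gap, ¬(c = '\'' ∨ c = '"')) ∧ (q = '\'' ∨ q = '"') := by
  intro cs
  fun_induction splitAtQuote cs with
  | case1 => simp
  | case2 c rest h =>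
    intro gap qq r hh; simp at hh; obtain ⟨h1, h2, h3⟩ := hh
    subst h1
    exact ⟨by simp, by simp_all⟩
  | case3 c rest h hsp => simp_all
  | case4 c rest h g q r hsp ih =>
    intro gap q' r' hh
    simp at hh
    obtain ⟨h1, h2, h3⟩ := hh
    subst h2 h3; subst h1
    obtain ⟨e2, e3⟩ := ih hsp
    refine ⟨?_, e3⟩
    intro cc hcc
    rcases List.mem_cons.mp hcc with hcc | hcc
    · subst hcc; exact h
    · exact e2 cc hcc

theorem fse_no_quote : ∀ (gap : List Char), (∀ c ∈ gap, ¬(c = '\'' ∨ c = '"')) →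
    ∀ rest, findStringEnds (gap ++ rest) = gap.map Sum.inr ++ findStringEnds rest := by
  intro gap
  induction gap with
  | nil => intro _ rest; simp
  | cons c t ih =>
    intro h rest
    have hc := h c (by simp)
    push_neg at hc
    rw [List.cons_append, findStringEnds]
    rw [if_neg (by simp [List.take]; intro e; exact absurd e hc.1)]
    rw [if_neg (by simp [List.take]; intro e; exact absurd e hc.2)]
    rw [if_neg hc.1, if_neg hc.2]
    simp only [List.map_cons, List.cons_append]
    rw [ih (fun x hx => h x (by simp [hx])) rest]

theorem fse_quote (q : Char) (rest : List Char) (hq : q = '\'' ∨ q = '"') :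
    findStringEnds (q :: rest) =
      Sum.inl (tripleSplit q rest).1 :: findStringEnds (tripleSplit q rest).2 := by
  rcases hq with hq | hq <;> subst hq <;>
    rw [findStringEnds, tripleSplit] <;> split_ifs with h1 h2 <;> simp_all

theorem foldl_inr (gap : List Char) :
    ∀ (st : List (String × String)) (buff : List (List Char)) (delim : Option (List Char)),
    List.foldl aStep (st, buff, delim) (gap.map Sum.inr)
      = (st, buff ++ gap.map (fun c => [c]), delim) := by
  induction gap with
  | nil => simp
  | cons c t ih =>
    intro st buff delim
    simp only [List.map_cons, List.foldl_cons, aStep]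
    rw [ih]
    simp

theorem flatten_singletons (cs : List Char) :
    (cs.map (fun c => ([c] : List Char))).flatten = cs := by
  induction cs with
  | nil => simp
  | cons a t iht => simp [iht]

theorem altLoop_none {cs : List Char} {parts : List (List Char)} {delim : Option (List Char)}
    (h : splitAtQuote cs = none) :
    altLoop cs parts delim =
      (if PySem.Chars.join [] (parts ++ [cs]) = [] then []
       else [("unprocessed", String.ofList (PySem.Chars.join [] (parts ++ [cs])))]) := by
  rw [altLoop]
  split
  · rfl
  · simp_all

theorem altLoop_some {cs gap : List Char} {q : Char} {rest : List Char}
    {parts : List (List Char)} {delim : Option (List Char)}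
    (h : splitAtQuote cs = some (gap, q, rest)) :
    altLoop cs parts delim =
      (match delim with
       | none =>
         (if PySem.Chars.join [] (parts ++ [gap]) = [] then []
          else [("unprocessed", String.ofList (PySem.Chars.join [] (parts ++ [gap])))]) ++
           altLoop (tripleSplit q rest).2 [] (some (tripleSplit q rest).1)
       | some dl =>
         if dl = (tripleSplit q rest).1 then
           ("literal", String.ofList (PySem.Chars.join [] (parts ++ [gap]))) ::
             altLoop (tripleSplit q rest).2 [] none
         else altLoop (tripleSplit q rest).2 (parts ++ [gap] ++ [(tripleSplit q rest).1]) delim) := by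
  rw [altLoop]
  split
  · simp_all
  · rename_i g2 q2 r2 heq
    rw [h] at heq
    obtain ⟨h1, h2, h3⟩ := by simpa using heq
    subst h1 h2 h3
    rfl

-- the shape of A's final flush, as a function of the loop state
def aFlush (r : List (String × String) × List (List Char) × Option (List Char)) :
    List (String × String) :=
  if r.2.1.length > 0 then r.1 ++ [("unprocessed", String.ofList (PySem.Chars.join [] r.2.1))]
  else r.1

theorem main_lemma : ∀ (n : ℕ) (cs : List Char), cs.length ≤ n →
    ∀ (st : List (String × String)) (buff parts : List (List Char)) (delim : Option (List Char)),
    (∀ x ∈ buff, x ≠ ([] : List Char)) → buff.flatten = parts.flatten →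
    aFlush (List.foldl aStep (st, buff, delim) (findStringEnds cs))
      = st ++ altLoop cs parts delim := by
  intro n
  induction n with
  | zero =>
    intro cs hlen st buff parts delim hne hflat
    have hcs : cs = [] := List.length_eq_zero_iff.mp (Nat.le_zero.mp hlen)
    subst hcs
    rw [altLoop_none (by simp [splitAtQuote])]
    rw [findStringEnds]
    simp only [List.foldl_nil, aFlush, jn_eq_flatten]
    simp only [List.flatten_append, List.flatten_cons, List.flatten_nil, List.append_nil]
    rw [← hflat]
    by_cases hb : buff = []
    · subst hb; simp
    · rw [if_pos (List.length_pos_iff.mpr hb)]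
      rw [if_neg (by rw [flatten_nil_iff hne]; exact hb)]
  | succ m ih =>
    intro cs hlen st buff parts delim hne hflat
    cases hsp : splitAtQuote cs with
    | none =>
      -- no quotes left: every remaining char goes to the buffer, then one final flush
      have hnq := splitAtQuote_none_no_quote hsp
      have hfse : findStringEnds cs = cs.map Sum.inr := by
        have := fse_no_quote cs hnq []
        simpa [findStringEnds] using this
      rw [hfse, foldl_inr, altLoop_none hsp]
      simp only [aFlush, jn_eq_flatten]
      simp only [List.flatten_append, List.flatten_cons, List.flatten_nil, List.append_nil]
      rw [flatten_singletons, ← hflat]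
      by_cases hb : buff ++ cs.map (fun c => ([c] : List Char)) = []
      · obtain ⟨hb1, hb2⟩ := List.append_eq_nil_iff.mp hb
        have hcs : cs = [] := by simpa using hb2
        rw [if_neg (by simp [hb1, hcs]), if_pos (by simp [hb1, hcs])]
        simp
      · have hside : buff.flatten ++ cs ≠ [] := by
          intro hcon
          rcases List.append_eq_nil_iff.mp hcon with ⟨hc1, hc2⟩
          exact hb (by simp [(flatten_nil_iff hne).mp hc1, hc2])
        rw [if_pos (List.length_pos_iff.mpr hb), if_neg hside]
    | some v =>
      obtain ⟨gap, q, rest⟩ := v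
      have hcs := splitAtQuote_some_eq hsp
      obtain ⟨hgap, hq⟩ := splitAtQuote_gap_no_quote hsp
      have hd_ne : (tripleSplit q rest).1 ≠ ([] : List Char) := by
        unfold tripleSplit; split <;> simp
      have hrest_len : (tripleSplit q rest).2.length ≤ rest.length := tripleSplit_len q rest
      have hlen' : (tripleSplit q rest).2.length ≤ m := by
        have : cs.length = gap.length + 1 + rest.length := by simp [hcs]; omega
        omega
      -- unfold one round of findStringEnds over gap ++ q :: rest
      rw [altLoop_some hsp]
      rw [hcs, fse_no_quote gap hgap, fse_quote q rest hq]
      rw [List.foldl_append, foldl_inr]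
      set buff1 := buff ++ gap.map (fun c => ([c] : List Char)) with hbuff1
      have hne1 : ∀ x ∈ buff1, x ≠ ([] : List Char) := by
        intro x hx
        rcases List.mem_append.mp hx with hx | hx
        · exact hne x hx
        · obtain ⟨c, _, rfl⟩ := List.mem_map.mp hx; simp
      have hflat1 : buff1.flatten = (parts ++ [gap]).flatten := by
        simp [hbuff1, hflat, flatten_singletons]
      -- one aStep on the delimiter, then the IH on the remainder
      simp only [List.foldl_cons]
      cases delim with
      | none =>
        have hstep : aStep (st, buff1, none) (Sum.inl (tripleSplit q rest).1)
            = ((if buff1.length > 0 then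
                  st ++ [("unprocessed", String.ofList (PySem.Chars.join [] buff1))] else st),
               [], some (tripleSplit q rest).1) := by
          simp [aStep]
        rw [hstep]
        rw [ih _ hlen' _ [] [] (some (tripleSplit q rest).1) (by simp) (by simp)]
        by_cases hb : buff1 = []
        · have hp : PySem.Chars.join [] (parts ++ [gap]) = [] := by
            rw [jn_eq_flatten, ← hflat1, hb]; simp
          rw [if_neg (by simp [hb]), if_pos hp]
          simp
        · rw [if_pos (List.length_pos_iff.mpr hb)]
          rw [if_neg (by rw [jn_eq_flatten, ← hflat1]
                         exact fun hcon => hb ((flatten_nil_iff hne1).mp hcon))]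
          simp [jn_eq_flatten, hflat1]
      | some dl =>
        by_cases hdl : dl = (tripleSplit q rest).1
        · have hstep : aStep (st, buff1, some dl) (Sum.inl (tripleSplit q rest).1)
              = (st ++ [("literal", String.ofList (PySem.Chars.join [] buff1))], [], none) := by
            simp [aStep, hdl]
          rw [hstep]
          rw [ih _ hlen' _ [] [] none (by simp) (by simp)]
          simp only [if_pos hdl]
          simp [jn_eq_flatten, hflat1]
        · have hstep : aStep (st, buff1, some dl) (Sum.inl (tripleSplit q rest).1)
              = (st, buff1 ++ [(tripleSplit q rest).1], some dl) := by
            simp [aStep, hdl]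
          rw [hstep]
          simp only [if_neg hdl]
          exact ih _ hlen' _ _ _ (some dl)
            (by intro x hx
                rcases List.mem_append.mp hx with hx | hx
                · exact hne1 x hx
                · simp at hx; subst hx; exact hd_ne)
            (by simp [hflat1])

-- ===== VERDICT (by name: the statement is the Claim_ definition above) =====
theorem extractStringLiterals_spec : Claim_equal_extractStringLiterals := by
  intro s _ _
  unfold Spec_extractStringLiterals extractStringLiterals extractStringLiterals_alt
  have := main_lemma s.toList.length s.toList le_rfl [] [] [] none (by simp) (by simp)
  simpa [aFlush] using this
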